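-- pv_equiv track=rewrite | github.com/k-harada/AtCoder | ARC/ARC157/C.py | solve
-- ===== SOURCE A (Python) =====
-- MOD = 998244353
--
-- def solve(h, w, s_list):
--     dp = [[[0, 0, 0] for _1 in range(w)] for _2 in range(h)]
--     dp[0][0][2] = 1
--     # ２乗和, 和, 個数
--     for j in range(1, w):
--         dp[0][j][2] = 1
--         if s_list[0][j] == s_list[0][j - 1] == "Y":
--             dp[0][j][1] = dp[0][j - 1][1] + 1
--             dp[0][j][0] = (dp[0][j][1] ** 2) % MOD
--         else:
--             dp[0][j][1] = dp[0][j - 1][1]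
--             dp[0][j][0] = dp[0][j - 1][0]
--
--     for i in range(1, h):
--         dp[i][0][2] = 1
--         if s_list[i][0] == s_list[i - 1][0] == "Y":
--             dp[i][0][1] = dp[i - 1][0][1] + 1
--             dp[i][0][0] = (dp[i][0][1] ** 2) % MOD
--         else:
--             dp[i][0][1] = dp[i - 1][0][1]
--             dp[i][0][0] = dp[i - 1][0][0]
--         for j in range(1, w):
--             dp[i][j][2] = (dp[i - 1][j][2] + dp[i][j - 1][2]) % MOD
--             if s_list[i][j] == s_list[i - 1][j] == "Y":
--                 dp[i][j][1] += dp[i - 1][j][1] + dp[i - 1][j][2]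
--                 dp[i][j][0] += (dp[i - 1][j][0] + 2 * dp[i - 1][j][1] + dp[i - 1][j][2]) % MOD
--             else:
--                 dp[i][j][1] += dp[i - 1][j][1]
--                 dp[i][j][0] += dp[i - 1][j][0]
--             if s_list[i][j] == s_list[i][j - 1] == "Y":
--                 dp[i][j][1] += dp[i][j - 1][1] + dp[i][j - 1][2]
--                 dp[i][j][0] += (dp[i][j - 1][0] + 2 * dp[i][j - 1][1] + dp[i][j - 1][2]) % MOD
--             else:
--                 dp[i][j][1] += dp[i][j - 1][1]
--                 dp[i][j][0] += dp[i][j - 1][0]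
--             dp[i][j][0] %= MOD
--             dp[i][j][1] %= MOD
--     return dp[-1][-1][0]
-- ===== SOURCE B (Python) =====
-- MOD = 998244353
--
--
-- def solve(h, w, s_list):
--     # Path-counting identity instead of a sum-of-squares DP:
--     # sum over paths of k^2 = sum over Y-Y edges e of
--     #   (2*S_before(e) + paths_to(e)) * paths_from(e),
--     # where paths_from is the mirrored Pascal table.
--     # Table 1: Pascal path counts (independent of the grid).
--     cnt = [[1] * w for _ in range(h)]
--     for i in range(1, h):
--         for j in range(1, w):
--             cnt[i][j] = (cnt[i - 1][j] + cnt[i][j - 1]) % MOD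
--     # Table 2: sum over paths to each cell of the number of Y-Y edges used.
--     sm = [[0] * w for _ in range(h)]
--     sm[0][0] = 0  # DP base: the empty path at the start cell uses no edge
--     for j in range(1, w):
--         sm[0][j] = (sm[0][j - 1] + (s_list[0][j] == s_list[0][j - 1] == "Y")) % MOD
--     for i in range(1, h):
--         sm[i][0] = (sm[i - 1][0] + (s_list[i][0] == s_list[i - 1][0] == "Y")) % MOD
--         for j in range(1, w):
--             sm[i][j] = (sm[i - 1][j]
--                         + (cnt[i - 1][j] if s_list[i][j] == s_list[i - 1][j] == "Y" else 0)
--                         + sm[i][j - 1]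
--                         + (cnt[i][j - 1] if s_list[i][j] == s_list[i][j - 1] == "Y" else 0)) % MOD
--     # Accumulate each Y-Y edge's contribution; cnt[h-1-i][w-1-j] counts paths
--     # from (i, j) to the bottom-right corner by symmetry.
--     ans = 0
--     for i in range(h):
--         for j in range(w):
--             rest = cnt[h - 1 - i][w - 1 - j]
--             if i and s_list[i][j] == s_list[i - 1][j] == "Y":
--                 ans += (2 * sm[i - 1][j] + cnt[i - 1][j]) * rest
--             if j and s_list[i][j] == s_list[i][j - 1] == "Y":
--                 ans += (2 * sm[i][j - 1] + cnt[i][j - 1]) * rest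
--     return ans % MOD
-- ===== Notes on version B (the rewrite author's own statement) =====
-- stated objective: alternative
-- what changed: A fills one grid of (sumsq,sum,count) triples with a fused sum-of-squares DP; B has no sum-of-squares recurrence at all: it builds a Pascal path-count table and a path-sum table, then sums per Y-Y edge the contribution (2*sum_before+count_before)*count_after, using the mirror symmetry cnt[h-1-i][w-1-j] for the number of paths from a cell to the corner.
import Mathlib
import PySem

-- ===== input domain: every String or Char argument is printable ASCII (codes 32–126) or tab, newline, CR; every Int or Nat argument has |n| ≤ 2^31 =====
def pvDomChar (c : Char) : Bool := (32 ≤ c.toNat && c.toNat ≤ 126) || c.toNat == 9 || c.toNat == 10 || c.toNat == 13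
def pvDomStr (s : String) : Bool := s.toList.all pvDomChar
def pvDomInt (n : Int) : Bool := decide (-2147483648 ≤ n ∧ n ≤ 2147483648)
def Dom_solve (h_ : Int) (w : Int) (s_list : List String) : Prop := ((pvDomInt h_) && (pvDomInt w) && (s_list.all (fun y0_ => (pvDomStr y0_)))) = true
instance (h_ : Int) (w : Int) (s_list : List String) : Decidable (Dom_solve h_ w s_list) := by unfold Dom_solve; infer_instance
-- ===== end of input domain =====

-- B replaces A's fused sum-of-squares DP by the path-counting identity
-- sum over paths of k^2 = sum over Y-Y edges of (2*sum_before + count_before) * count_after,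
-- with count_after read off the mirrored Pascal count table; objective: alternative
-- algorithm, same asymptotic cost.

def pMOD : Int := 998244353

-- character grid access shared by both ports (the default is never reached under Pre_solve)
def gchar (g : List (List Char)) (i j : Nat) : Char := (g.getD i []).getD j ' '

-- Python's chained `s_list[i1][j1] == s_list[i2][j2] == "Y"`
def isYY (g : List (List Char)) (i1 j1 i2 j2 : Nat) : Bool :=
  gchar g i1 j1 == gchar g i2 j2 && gchar g i2 j2 == 'Y'

-- ===== PORT A =====
-- first loop of A: row 0 of dp, cells are (sumsq, sum, count)
def aRow0 (g : List (List Char)) (W : Nat) : List (Int × Int × Int) :=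
  ((List.range' 1 (W - 1)).foldl
    (fun st j =>
      let c :=
        if isYY g 0 j 0 (j - 1) then
          ((st.2.2.1 + 1) * (st.2.2.1 + 1) % pMOD, st.2.2.1 + 1, (1 : Int))
        else (st.2.1, st.2.2.1, (1 : Int))
      (st.1 ++ [c], c))
    ([((0 : Int), (0 : Int), (1 : Int))], ((0 : Int), (0 : Int), (1 : Int)))).1

-- column-0 cell of A's row i (the statements before A's inner loop)
def aCol0 (g : List (List Char)) (i : Nat) (prev : List (Int × Int × Int)) : Int × Int × Int :=
  let u := prev.getD 0 (0, 0, 0)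
  if isYY g i 0 (i - 1) 0 then
    ((u.2.1 + 1) * (u.2.1 + 1) % pMOD, u.2.1 + 1, (1 : Int))
  else (u.1, u.2.1, (1 : Int))

-- body of A's outer loop: dp row i from dp row i-1
def aRow (g : List (List Char)) (W : Nat) (i : Nat) (prev : List (Int × Int × Int)) :
    List (Int × Int × Int) :=
  ((List.range' 1 (W - 1)).foldl
    (fun st j =>
      let u := prev.getD j (0, 0, 0)
      let p := st.2
      let cn := (u.2.2 + p.2.2) % pMOD
      let sm2 := (if isYY g i j (i - 1) j then u.2.1 + u.2.2 else u.2.1) +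
                 (if isYY g i j i (j - 1) then p.2.1 + p.2.2 else p.2.1)
      let sq2 := (if isYY g i j (i - 1) j then (u.1 + 2 * u.2.1 + u.2.2) % pMOD else u.1) +
                 (if isYY g i j i (j - 1) then (p.1 + 2 * p.2.1 + p.2.2) % pMOD else p.1)
      let c := (sq2 % pMOD, sm2 % pMOD, cn)
      (st.1 ++ [c], c))
    ([aCol0 g i prev], aCol0 g i prev)).1

def solve (h_ : Int) (w : Int) (s_list : List String) : Int :=
  let H := h_.toNat
  let W := w.toNat
  let g := s_list.map (·.toList)
  let lastRow := (List.range' 1 (H - 1)).foldl (fun prev i => aRow g W i prev) (aRow0 g W)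
  (lastRow.getLastD (0, 0, 0)).1

-- ===== PORT B =====
-- table 1 inner loop: Pascal count row i from row i-1 (border cell stays 1)
def bCntRow (W : Nat) (pc : List Int) : List Int :=
  ((List.range' 1 (W - 1)).foldl
    (fun st j => let c := (pc.getD j 0 + st.2) % pMOD; (st.1 ++ [c], c))
    ([(1 : Int)], (1 : Int))).1

-- table 1: the full Pascal count matrix (independent of the grid)
def bCntGrid (W H : Nat) : List (List Int) :=
  ((List.range' 1 (H - 1)).foldl
    (fun st _i => let r := bCntRow W st.2; (st.1 ++ [r], r))
    ([List.replicate W 1], List.replicate W 1)).1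

-- table 2 first loop: sum row 0 (Source B's explicit base `sm[0][0] = 0` is the 0 this row starts from)
def bSmRow0 (g : List (List Char)) (W : Nat) : List Int :=
  ((List.range' 1 (W - 1)).foldl
    (fun st j => let c := (st.2 + (if isYY g 0 j 0 (j - 1) then 1 else 0)) % pMOD; (st.1 ++ [c], c))
    ([(0 : Int)], (0 : Int))).1

-- column-0 cell of sum row i
def bSmCol0 (g : List (List Char)) (i : Nat) (pm : List Int) : Int :=
  (pm.getD 0 0 + (if isYY g i 0 (i - 1) 0 then 1 else 0)) % pMOD

-- table 2 inner loop: sum row i from sum row i-1 and count rows i-1 (cp) / i (cc)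
def bSmRow (g : List (List Char)) (W : Nat) (i : Nat) (cp cc pm : List Int) : List Int :=
  ((List.range' 1 (W - 1)).foldl
    (fun st j =>
      let c := (pm.getD j 0 + (if isYY g i j (i - 1) j then cp.getD j 0 else 0) +
                st.2 + (if isYY g i j i (j - 1) then cc.getD (j - 1) 0 else 0)) % pMOD
      (st.1 ++ [c], c))
    ([bSmCol0 g i pm], bSmCol0 g i pm)).1

-- table 2: the full sum matrix, reading the completed count matrix
def bSmGrid (g : List (List Char)) (W H : Nat) : List (List Int) :=
  ((List.range' 1 (H - 1)).foldl
    (fun st i =>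
      let r := bSmRow g W i ((bCntGrid W H).getD (i - 1) []) ((bCntGrid W H).getD i []) st.2
      (st.1 ++ [r], r))
    ([bSmRow0 g W], bSmRow0 g W)).1

def solve_alt (h_ : Int) (w : Int) (s_list : List String) : Int :=
  let H := h_.toNat
  let W := w.toNat
  let g := s_list.map (·.toList)
  let cnt := bCntGrid W H
  let sm := bSmGrid g W H
  let ans := (List.range H).foldl
    (fun acc i => (List.range W).foldl
      (fun acc j =>
        let rest := (cnt.getD (H - 1 - i) []).getD (W - 1 - j) 0
        let acc1 := if 0 < i ∧ isYY g i j (i - 1) j = true then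
            acc + (2 * ((sm.getD (i - 1) []).getD j 0) + (cnt.getD (i - 1) []).getD j 0) * rest
          else acc
        if 0 < j ∧ isYY g i j i (j - 1) = true then
          acc1 + (2 * ((sm.getD i []).getD (j - 1) 0) + (cnt.getD i []).getD (j - 1) 0) * rest
        else acc1)
      acc)
    0
  ans % pMOD

-- ===== PRECONDITION & SPEC =====
-- exactly the inputs on which Python A returns: h,w ≥ 1, and whenever some character is
-- actually read (h ≥ 2 or w ≥ 2) the first h strings exist and have length ≥ w
def Pre_solve (h_ : Int) (w : Int) (s_list : List String) : Prop :=
  1 ≤ h_ ∧ 1 ≤ w ∧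
    ((2 ≤ h_ ∨ 2 ≤ w) →
      (h_.toNat ≤ s_list.length ∧ ∀ s ∈ s_list.take h_.toNat, w.toNat ≤ s.length))
instance (h_ : Int) (w : Int) (s_list : List String) : Decidable (Pre_solve h_ w s_list) := by
  unfold Pre_solve; infer_instance

def pvWitness_solve : Int × Int × List String := (2, 3, ["YYN", "YYY"])

def Spec_solve (h_ : Int) (w : Int) (s_list : List String) (out : Int) : Prop := out = solve_alt h_ w s_list
instance (h_ : Int) (w : Int) (s_list : List String) (out : Int) : Decidable (Spec_solve h_ w s_list out) := by unfold Spec_solve; infer_instance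

-- ===== CLAIM (what is proved, stated in full; the proofs are below) =====
def Claim_equal_solve : Prop := ∀ (h_ : Int) (w : Int) (s_list : List String), Dom_solve h_ w s_list → Pre_solve h_ w s_list → Spec_solve h_ w s_list (solve h_ w s_list)

-- ===== LEMMAS AND PROOFS =====

-- generic shape of all the row-building folds above: state = (list built so far, last value)
theorem foldl_build {α : Type} (gstep : List α × α → Nat → List α × α) (f : Nat → α → α)
    (F : Nat → α)
    (hg : ∀ st j, gstep st j = (st.1 ++ [f j st.2], f j st.2))
    (hF : ∀ j, F (j + 1) = f (j + 1) (F j)) :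
    ∀ (n : Nat) (L : List α),
      (List.range' 1 n).foldl gstep (L, F 0) = (L ++ (List.range' 1 n).map F, F n) := by
  intro n
  induction n with
  | zero => intro L; simp
  | succ n ih =>
    intro L
    have hr : List.range' 1 (n + 1) = List.range' 1 n ++ [1 + n] := by
      simpa using (List.range'_concat (s := 1) (n := n) (step := 1))
    rw [hr, List.foldl_append, ih, List.map_append, List.foldl_cons, List.foldl_nil, hg]
    have h1 : 1 + n = n + 1 := Nat.add_comm 1 n
    simp [h1, hF n]

theorem foldl_iter {α : Type} (gstep : α → Nat → α) (f : Nat → α → α) (F : Nat → α)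
    (hg : ∀ p j, gstep p j = f j p)
    (hF : ∀ j, F (j + 1) = f (j + 1) (F j)) :
    ∀ n, (List.range' 1 n).foldl gstep (F 0) = F n := by
  intro n
  induction n with
  | zero => simp
  | succ n ih =>
    have hr : List.range' 1 (n + 1) = List.range' 1 n ++ [1 + n] := by
      simpa using (List.range'_concat (s := 1) (n := n) (step := 1))
    rw [hr, List.foldl_append, ih, List.foldl_cons, List.foldl_nil, hg]
    rw [Nat.add_comm 1 n, hF n]

theorem map_range_build {α : Type} (F : Nat → α) (n : Nat) :
    [F 0] ++ (List.range' 1 n).map F = (List.range (n + 1)).map F := by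
  rw [List.range_eq_range', List.range'_succ]
  simp

theorem getD_map_range {α : Type} (F : Nat → α) (n j : Nat) (d : α) (hj : j < n) :
    ((List.range n).map F).getD j d = F j := by
  rw [List.getD_eq_getElem?_getD]
  simp [hj]

theorem getLastD_map_range {α : Type} (F : Nat → α) (d : α) (n : Nat) (hn : 1 ≤ n) :
    ((List.range n).map F).getLastD d = F (n - 1) := by
  obtain ⟨k, rfl⟩ : ∃ k, n = k + 1 := ⟨n - 1, by omega⟩
  rw [List.range_succ]
  simp

-- casting helpers between % pMOD arithmetic and ZMod 998244353
theorem pM_nat : ((998244353 : Nat) : Int) = pMOD := by norm_num [pMOD]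

theorem castM (a : Int) : ((a % pMOD : Int) : ZMod 998244353) = (a : ZMod 998244353) := by
  rw [← pM_nat, ZMod.intCast_mod]

theorem mod_eq_of_cast {a b : Int}
    (h : (a : ZMod 998244353) = (b : ZMod 998244353)) : a % pMOD = b % pMOD := by
  rw [← pM_nat]
  exact (ZMod.intCast_eq_intCast_iff' a b _).mp h


-- ===== exact (unreduced) mathematics of the grid =====
-- wv i j: weight (0/1) of the vertical edge entering (i,j) from above (meaningful for i ≥ 1)
def wv (g : List (List Char)) (i j : Nat) : Int := if isYY g i j (i - 1) j then 1 else 0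
-- wh i j: weight of the horizontal edge entering (i,j) from the left (meaningful for j ≥ 1)
def wh (g : List (List Char)) (i j : Nat) : Int := if isYY g i j i (j - 1) then 1 else 0

-- number of monotone lattice paths from (0,0) to (i,j)
def Npaths : Nat → Nat → Int
  | 0, _ => 1
  | _ + 1, 0 => 1
  | i + 1, j + 1 => Npaths i (j + 1) + Npaths (i + 1) j

-- exact sum over paths to (i,j) of the number of Y-Y edges used
def Spaths (g : List (List Char)) : Nat → Nat → Int
  | 0, 0 => 0
  | 0, j + 1 => Spaths g 0 j + wh g 0 (j + 1) * Npaths 0 j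
  | i + 1, 0 => Spaths g i 0 + wv g (i + 1) 0 * Npaths i 0
  | i + 1, j + 1 =>
      Spaths g i (j + 1) + wv g (i + 1) (j + 1) * Npaths i (j + 1) +
      (Spaths g (i + 1) j + wh g (i + 1) (j + 1) * Npaths (i + 1) j)

-- per-cell increment of the sum-of-squares quantity
def gQ (g : List (List Char)) : Nat → Nat → Int
  | 0, 0 => 0
  | 0, j + 1 => wh g 0 (j + 1) * (2 * Spaths g 0 j + Npaths 0 j)
  | i + 1, 0 => wv g (i + 1) 0 * (2 * Spaths g i 0 + Npaths i 0)
  | i + 1, j + 1 =>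
      wv g (i + 1) (j + 1) * (2 * Spaths g i (j + 1) + Npaths i (j + 1)) +
      wh g (i + 1) (j + 1) * (2 * Spaths g (i + 1) j + Npaths (i + 1) j)

-- exact sum over paths to (i,j) of (number of Y-Y edges)^2
def Qpaths (g : List (List Char)) : Nat → Nat → Int
  | 0, 0 => 0
  | 0, j + 1 => Qpaths g 0 j + gQ g 0 (j + 1)
  | i + 1, 0 => Qpaths g i 0 + gQ g (i + 1) 0
  | i + 1, j + 1 => Qpaths g i (j + 1) + Qpaths g (i + 1) j + gQ g (i + 1) (j + 1)

theorem Npaths_zero (j : Nat) : Npaths 0 j = 1 := by simp [Npaths]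
theorem Npaths_zero' (i : Nat) : Npaths i 0 = 1 := by cases i <;> simp [Npaths]
theorem Npaths_succ (i j : Nat) :
    Npaths (i + 1) (j + 1) = Npaths i (j + 1) + Npaths (i + 1) j := by simp [Npaths]

-- the inner double-sum reshuffle used by the transfer lemma
theorem sum_split (gf : Nat → Nat → Int) (a b : Nat) :
    (∑ i ∈ Finset.range (a + 1), ∑ j ∈ Finset.range (b + 2), gf i j * Npaths (a - i) (b + 1 - j)) +
      (∑ i ∈ Finset.range (a + 2), ∑ j ∈ Finset.range (b + 1), gf i j * Npaths (a + 1 - i) (b - j)) +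
      gf (a + 1) (b + 1) =
    ∑ i ∈ Finset.range (a + 2), ∑ j ∈ Finset.range (b + 2), gf i j * Npaths (a + 1 - i) (b + 1 - j) := by
  have e1 : ∀ i ∈ Finset.range (a + 1),
      (∑ j ∈ Finset.range (b + 2), gf i j * Npaths (a + 1 - i) (b + 1 - j)) =
      (∑ j ∈ Finset.range (b + 1), gf i j * Npaths (a - i) (b + 1 - j)) +
      (∑ j ∈ Finset.range (b + 1), gf i j * Npaths (a + 1 - i) (b - j)) + gf i (b + 1) := by
    intro i hi
    rw [Finset.mem_range] at hi
    rw [Finset.sum_range_succ, Nat.sub_self, Npaths_zero', mul_one, ← Finset.sum_add_distrib]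
    congr 1
    apply Finset.sum_congr rfl
    intro j hj
    rw [Finset.mem_range] at hj
    have hai : a + 1 - i = (a - i) + 1 := by omega
    have hbj : b + 1 - j = (b - j) + 1 := by omega
    rw [hai, hbj, Npaths_succ, ← hbj, ← hai, mul_add]
  have e2 : ∀ i ∈ Finset.range (a + 1),
      (∑ j ∈ Finset.range (b + 2), gf i j * Npaths (a - i) (b + 1 - j)) =
      (∑ j ∈ Finset.range (b + 1), gf i j * Npaths (a - i) (b + 1 - j)) + gf i (b + 1) := by
    intro i hi
    rw [Finset.sum_range_succ, Nat.sub_self, Npaths_zero', mul_one]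
  rw [Finset.sum_range_succ
      (fun i => ∑ j ∈ Finset.range (b + 2), gf i j * Npaths (a + 1 - i) (b + 1 - j)) (a + 1)]
  rw [Finset.sum_range_succ
      (fun i => ∑ j ∈ Finset.range (b + 1), gf i j * Npaths (a + 1 - i) (b - j)) (a + 1)]
  rw [Finset.sum_congr rfl e1, Finset.sum_congr rfl e2]
  have e3 : (∑ j ∈ Finset.range (b + 2), gf (a + 1) j * Npaths (a + 1 - (a + 1)) (b + 1 - j)) =
      (∑ j ∈ Finset.range (b + 1), gf (a + 1) j * Npaths (a + 1 - (a + 1)) (b - j)) +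
        gf (a + 1) (b + 1) := by
    rw [Finset.sum_range_succ, Nat.sub_self, Npaths_zero, mul_one]
    congr 1
    apply Finset.sum_congr rfl
    intro j hj
    rw [Npaths_zero, Npaths_zero]
  rw [e3]
  simp only [Finset.sum_add_distrib]
  ring

-- the transfer lemma: a grid recurrence with per-cell increments sums each increment
-- once per continuation path (counted by the mirrored Npaths)
theorem transfer (f gf : Nat → Nat → Int)
    (h00 : f 0 0 = 0) (hg00 : gf 0 0 = 0)
    (hrow : ∀ j, f 0 (j + 1) = f 0 j + gf 0 (j + 1))
    (hcol : ∀ i, f (i + 1) 0 = f i 0 + gf (i + 1) 0)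
    (hint : ∀ i j, f (i + 1) (j + 1) = f i (j + 1) + f (i + 1) j + gf (i + 1) (j + 1)) :
    ∀ a b, f a b =
      ∑ i ∈ Finset.range (a + 1), ∑ j ∈ Finset.range (b + 1), gf i j * Npaths (a - i) (b - j) := by
  intro a
  induction a with
  | zero =>
    intro b
    induction b with
    | zero => simp [h00, hg00]
    | succ b ihb =>
      rw [hrow b, ihb]
      simp [Finset.sum_range_succ, Npaths_zero]
  | succ a iha =>
    intro b
    induction b with
    | zero =>
      rw [hcol a, iha 0]
      simp [Finset.sum_range_succ, Npaths_zero, Npaths_zero']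
    | succ b ihb =>
      rw [hint a b, iha (b + 1), ihb, ← sum_split gf a b]

-- Qpaths as the mirrored-count weighted sum of the per-cell increments
theorem QgN (g : List (List Char)) : ∀ a b, Qpaths g a b =
    ∑ i ∈ Finset.range (a + 1), ∑ j ∈ Finset.range (b + 1), gQ g i j * Npaths (a - i) (b - j) := by
  refine transfer (Qpaths g) (gQ g) (by simp [Qpaths]) (by simp [gQ]) ?_ ?_ ?_
  · intro j; simp [Qpaths]
  · intro i; simp [Qpaths]
  · intro i j; simp [Qpaths]

-- on row 0 / column 0 the square quantity is the square of the sum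
theorem Q0_sq (g : List (List Char)) : ∀ j, Qpaths g 0 j = Spaths g 0 j ^ 2 := by
  intro j
  induction j with
  | zero => simp [Qpaths, Spaths]
  | succ j ih =>
    simp only [Qpaths, gQ, Spaths, wh, Npaths_zero, Nat.add_sub_cancel]
    split_ifs <;> rw [ih] <;> ring

theorem Qc0_sq (g : List (List Char)) : ∀ i, Qpaths g i 0 = Spaths g i 0 ^ 2 := by
  intro i
  induction i with
  | zero => simp [Qpaths, Spaths]
  | succ i ih =>
    simp only [Qpaths, gQ, Spaths, wv, Npaths_zero', Nat.add_sub_cancel]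
    split_ifs <;> rw [ih] <;> ring

-- ===== A-side: the fold rows as recurrences =====
def FA0 (g : List (List Char)) : Nat → Int × Int × Int
  | 0 => (0, 0, 1)
  | j + 1 =>
      let p := FA0 g j
      if isYY g 0 (j + 1) 0 j then
        ((p.2.1 + 1) * (p.2.1 + 1) % pMOD, p.2.1 + 1, 1)
      else (p.1, p.2.1, 1)

def FAr (g : List (List Char)) (i : Nat) (prev : List (Int × Int × Int)) : Nat → Int × Int × Int
  | 0 => aCol0 g i prev
  | j + 1 =>
      let u := prev.getD (j + 1) (0, 0, 0)
      let p := FAr g i prev j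
      let cn := (u.2.2 + p.2.2) % pMOD
      let sm2 := (if isYY g i (j + 1) (i - 1) (j + 1) then u.2.1 + u.2.2 else u.2.1) +
                 (if isYY g i (j + 1) i j then p.2.1 + p.2.2 else p.2.1)
      let sq2 := (if isYY g i (j + 1) (i - 1) (j + 1) then (u.1 + 2 * u.2.1 + u.2.2) % pMOD else u.1) +
                 (if isYY g i (j + 1) i j then (p.1 + 2 * p.2.1 + p.2.2) % pMOD else p.1)
      (sq2 % pMOD, sm2 % pMOD, cn)

def ARf (g : List (List Char)) (W : Nat) : Nat → List (Int × Int × Int)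
  | 0 => aRow0 g W
  | i + 1 => aRow g W (i + 1) (ARf g W i)

theorem aRow0_eq (g : List (List Char)) (W : Nat) (hW : 1 ≤ W) :
    aRow0 g W = (List.range W).map (FA0 g) := by
  have h := foldl_build
      (fun st j =>
        let c :=
          if isYY g 0 j 0 (j - 1) then
            ((st.2.2.1 + 1) * (st.2.2.1 + 1) % pMOD, st.2.2.1 + 1, (1 : Int))
          else (st.2.1, st.2.2.1, (1 : Int))
        (st.1 ++ [c], c))
      (fun j p => if isYY g 0 j 0 (j - 1) then
          ((p.2.1 + 1) * (p.2.1 + 1) % pMOD, p.2.1 + 1, (1 : Int))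
        else (p.1, p.2.1, (1 : Int)))
      (FA0 g) (fun st j => rfl) (fun j => rfl) (W - 1) [(0, 0, 1)]
  unfold aRow0
  rw [show ([((0 : Int), (0 : Int), (1 : Int))], ((0 : Int), (0 : Int), (1 : Int)))
        = (([((0 : Int), (0 : Int), (1 : Int))], FA0 g 0) :
            List (Int × Int × Int) × (Int × Int × Int)) from rfl, h]
  show [FA0 g 0] ++ _ = _
  rw [map_range_build, Nat.sub_add_cancel hW]

theorem aRow_eq (g : List (List Char)) (W i : Nat) (prev : List (Int × Int × Int)) (hW : 1 ≤ W) :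
    aRow g W i prev = (List.range W).map (FAr g i prev) := by
  have h := foldl_build
      (fun st j =>
        let u := prev.getD j (0, 0, 0)
        let p := st.2
        let cn := (u.2.2 + p.2.2) % pMOD
        let sm2 := (if isYY g i j (i - 1) j then u.2.1 + u.2.2 else u.2.1) +
                   (if isYY g i j i (j - 1) then p.2.1 + p.2.2 else p.2.1)
        let sq2 := (if isYY g i j (i - 1) j then (u.1 + 2 * u.2.1 + u.2.2) % pMOD else u.1) +
                   (if isYY g i j i (j - 1) then (p.1 + 2 * p.2.1 + p.2.2) % pMOD else p.1)
        let c := (sq2 % pMOD, sm2 % pMOD, cn)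
        (st.1 ++ [c], c))
      (fun j p =>
        (((if isYY g i j (i - 1) j then
              ((prev.getD j (0,0,0)).1 + 2 * (prev.getD j (0,0,0)).2.1 + (prev.getD j (0,0,0)).2.2) % pMOD
            else (prev.getD j (0,0,0)).1) +
           (if isYY g i j i (j - 1) then (p.1 + 2 * p.2.1 + p.2.2) % pMOD else p.1)) % pMOD,
         ((if isYY g i j (i - 1) j then (prev.getD j (0,0,0)).2.1 + (prev.getD j (0,0,0)).2.2
             else (prev.getD j (0,0,0)).2.1) +
            (if isYY g i j i (j - 1) then p.2.1 + p.2.2 else p.2.1)) % pMOD,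
         ((prev.getD j (0,0,0)).2.2 + p.2.2) % pMOD))
      (FAr g i prev) (fun st j => rfl) (fun j => rfl) (W - 1) [aCol0 g i prev]
  unfold aRow
  rw [show ([aCol0 g i prev], aCol0 g i prev)
        = (([aCol0 g i prev], FAr g i prev 0) :
            List (Int × Int × Int) × (Int × Int × Int)) from rfl, h]
  show [FAr g i prev 0] ++ _ = _
  rw [map_range_build, Nat.sub_add_cancel hW]

-- invariant carried by every cell of A's dp
def cellInv (g : List (List Char)) (i j : Nat) (c : Int × Int × Int) : Prop :=
  c.1 = Qpaths g i j % pMOD ∧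
  ((c.2.1 : ZMod 998244353) = (Spaths g i j : ZMod 998244353)) ∧
  ((c.2.2 : ZMod 998244353) = (Npaths i j : ZMod 998244353))

theorem FA0_inv (g : List (List Char)) : ∀ j, cellInv g 0 j (FA0 g j) := by
  intro j
  induction j with
  | zero =>
    refine ⟨by simp [FA0, Qpaths], by simp [FA0, Spaths], by simp [FA0, Npaths_zero]⟩
  | succ j ih =>
    obtain ⟨h1, h2, h3⟩ := ih
    by_cases hc : isYY g 0 (j + 1) 0 j = true
    · have hS : Spaths g 0 (j + 1) = Spaths g 0 j + 1 := by
        simp [Spaths, wh, hc, Npaths_zero, Nat.add_sub_cancel]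
      have hQ : Qpaths g 0 (j + 1) = (Spaths g 0 j + 1) ^ 2 := by
        rw [Q0_sq, hS]
      have hcell : FA0 g (j + 1) =
          (((FA0 g j).2.1 + 1) * ((FA0 g j).2.1 + 1) % pMOD, (FA0 g j).2.1 + 1, 1) := by
        simp [FA0, hc]
      rw [hcell]
      refine ⟨?_, ?_, ?_⟩
      · apply mod_eq_of_cast
        rw [hQ]
        simp only [Int.cast_add, Int.cast_mul, Int.cast_one, Int.cast_zero, Int.cast_two, Int.cast_pow, h2]
        try ring
      · rw [hS]
        simp only [Int.cast_add, Int.cast_mul, Int.cast_one, Int.cast_zero, Int.cast_two, Int.cast_pow, h2]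
      · rw [Npaths_zero]
    · have hS : Spaths g 0 (j + 1) = Spaths g 0 j := by
        simp [Spaths, wh, hc, Npaths_zero, Nat.add_sub_cancel]
      have hQ : Qpaths g 0 (j + 1) = Qpaths g 0 j := by
        simp [Qpaths, gQ, wh, hc, Nat.add_sub_cancel]
      have hcell : FA0 g (j + 1) = ((FA0 g j).1, (FA0 g j).2.1, 1) := by
        simp [FA0, hc]
      rw [hcell]
      exact ⟨by rw [hQ]; exact h1, by rw [hS]; exact h2, by rw [Npaths_zero]⟩

theorem FAr_inv (g : List (List Char)) (W i : Nat) (prev : List (Int × Int × Int))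
    (hprev : ∀ j, j < W → cellInv g i j (prev.getD j (0, 0, 0))) :
    ∀ j, j < W → cellInv g (i + 1) j (FAr g (i + 1) prev j) := by
  intro j
  induction j with
  | zero =>
    intro h0
    obtain ⟨h1, h2, h3⟩ := hprev 0 h0
    have hcol0 : FAr g (i + 1) prev 0 = (if isYY g (i + 1) 0 i 0 then
        (((prev.getD 0 (0, 0, 0)).2.1 + 1) * ((prev.getD 0 (0, 0, 0)).2.1 + 1) % pMOD,
          (prev.getD 0 (0, 0, 0)).2.1 + 1, (1 : Int))
      else ((prev.getD 0 (0, 0, 0)).1, (prev.getD 0 (0, 0, 0)).2.1, (1 : Int))) := by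
      show aCol0 g (i + 1) prev = _
      simp [aCol0, Nat.add_sub_cancel]
    have hQr : Qpaths g (i + 1) 0 = Qpaths g i 0 + wv g (i + 1) 0 * (2 * Spaths g i 0 + 1) := by
      simp [Qpaths, gQ, Npaths_zero']
    have hSr : Spaths g (i + 1) 0 = Spaths g i 0 + wv g (i + 1) 0 := by
      simp [Spaths, Npaths_zero']
    rw [hcol0]
    by_cases hc : isYY g (i + 1) 0 i 0 = true
    · have hwx : wv g (i + 1) 0 = 1 := by simp [wv, Nat.add_sub_cancel, hc]
      rw [if_pos hc]
      refine ⟨?_, ?_, ?_⟩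
      · apply mod_eq_of_cast
        rw [hQr, hwx, Qc0_sq]
        simp only [Int.cast_add, Int.cast_mul, Int.cast_one, Int.cast_zero, Int.cast_two, Int.cast_pow, h2]
        try ring
      · rw [hSr, hwx]
        simp only [Int.cast_add, Int.cast_mul, Int.cast_one, Int.cast_zero, Int.cast_two, Int.cast_pow, h2]
      · rw [Npaths_zero']
    · have hwx : wv g (i + 1) 0 = 0 := by simp [wv, Nat.add_sub_cancel, hc]
      rw [if_neg hc]
      refine ⟨?_, ?_, ?_⟩
      · rw [hQr, hwx]; simpa using h1
      · rw [hSr, hwx]; simpa using h2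
      · rw [Npaths_zero']
  | succ j ihj =>
    intro hj1
    have hj : j < W := Nat.lt_of_succ_lt hj1
    obtain ⟨pq, pm, pn⟩ := ihj hj
    obtain ⟨uq, um, un⟩ := hprev (j + 1) hj1
    have hstep : FAr g (i + 1) prev (j + 1) =
        (((if isYY g (i + 1) (j + 1) i (j + 1) then
              ((prev.getD (j + 1) (0,0,0)).1 + 2 * (prev.getD (j + 1) (0,0,0)).2.1 +
                (prev.getD (j + 1) (0,0,0)).2.2) % pMOD
            else (prev.getD (j + 1) (0,0,0)).1) +
          (if isYY g (i + 1) (j + 1) (i + 1) j then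
              ((FAr g (i + 1) prev j).1 + 2 * (FAr g (i + 1) prev j).2.1 +
                (FAr g (i + 1) prev j).2.2) % pMOD
            else (FAr g (i + 1) prev j).1)) % pMOD,
         ((if isYY g (i + 1) (j + 1) i (j + 1) then
              (prev.getD (j + 1) (0,0,0)).2.1 + (prev.getD (j + 1) (0,0,0)).2.2
            else (prev.getD (j + 1) (0,0,0)).2.1) +
          (if isYY g (i + 1) (j + 1) (i + 1) j then
              (FAr g (i + 1) prev j).2.1 + (FAr g (i + 1) prev j).2.2
            else (FAr g (i + 1) prev j).2.1)) % pMOD,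
         ((prev.getD (j + 1) (0,0,0)).2.2 + (FAr g (i + 1) prev j).2.2) % pMOD) := by
      simp [FAr, Nat.add_sub_cancel]
    have hQr : Qpaths g (i + 1) (j + 1) = Qpaths g i (j + 1) + Qpaths g (i + 1) j +
        (wv g (i + 1) (j + 1) * (2 * Spaths g i (j + 1) + Npaths i (j + 1)) +
         wh g (i + 1) (j + 1) * (2 * Spaths g (i + 1) j + Npaths (i + 1) j)) := by
      simp [Qpaths, gQ]
    have hSr : Spaths g (i + 1) (j + 1) = Spaths g i (j + 1) +
        wv g (i + 1) (j + 1) * Npaths i (j + 1) +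
        (Spaths g (i + 1) j + wh g (i + 1) (j + 1) * Npaths (i + 1) j) := by
      simp [Spaths]
    have hwv : wv g (i + 1) (j + 1) = if isYY g (i + 1) (j + 1) i (j + 1) then 1 else 0 := by
      simp [wv, Nat.add_sub_cancel]
    have hwh : wh g (i + 1) (j + 1) = if isYY g (i + 1) (j + 1) (i + 1) j then 1 else 0 := by
      simp [wh, Nat.add_sub_cancel]
    have cu1 : (((prev.getD (j + 1) (0,0,0)).1 : Int) : ZMod 998244353) =
        ((Qpaths g i (j + 1) : Int) : ZMod 998244353) := by rw [uq]; exact castM _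
    have cp1 : (((FAr g (i + 1) prev j).1 : Int) : ZMod 998244353) =
        ((Qpaths g (i + 1) j : Int) : ZMod 998244353) := by rw [pq]; exact castM _
    rw [hstep]
    refine ⟨?_, ?_, ?_⟩
    · apply mod_eq_of_cast
      rw [hQr, hwv, hwh]
      split_ifs <;> (simp only [Int.cast_add, Int.cast_mul, Int.cast_one, Int.cast_zero, Int.cast_two, Int.cast_pow, castM, cu1, cp1, um, un, pm, pn]; try ring)
    · apply Eq.trans (castM _)
      rw [hSr, hwv, hwh]
      split_ifs <;> (simp only [Int.cast_add, Int.cast_mul, Int.cast_one, Int.cast_zero, Int.cast_two, Int.cast_pow, um, un, pm, pn]; try ring)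
    · apply Eq.trans (castM _)
      rw [Npaths_succ]
      simp only [Int.cast_add, Int.cast_mul, Int.cast_one, Int.cast_zero, Int.cast_two, Int.cast_pow, un, pn]

theorem ARf_inv (g : List (List Char)) (W : Nat) (hW : 1 ≤ W) :
    ∀ i j, j < W → cellInv g i j ((ARf g W i).getD j (0, 0, 0)) := by
  intro i
  induction i with
  | zero =>
    intro j hj
    rw [ARf, aRow0_eq g W hW, getD_map_range _ _ _ _ hj]
    exact FA0_inv g j
  | succ i ih =>
    intro j hj
    rw [ARf, aRow_eq g W (i + 1) _ hW, getD_map_range _ _ _ _ hj]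
    exact FAr_inv g W i _ ih j hj

theorem ARf_map (g : List (List Char)) (W : Nat) (hW : 1 ≤ W) :
    ∀ i, ∃ F, ARf g W i = (List.range W).map F := by
  intro i
  cases i with
  | zero => exact ⟨_, aRow0_eq g W hW⟩
  | succ i => exact ⟨_, aRow_eq g W (i + 1) _ hW⟩

-- ===== B-side recurrences =====
def FC (pc : List Int) : Nat → Int
  | 0 => 1
  | j + 1 => (pc.getD (j + 1) 0 + FC pc j) % pMOD

def FM0 (g : List (List Char)) : Nat → Int
  | 0 => 0
  | j + 1 => (FM0 g j + (if isYY g 0 (j + 1) 0 j then 1 else 0)) % pMOD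

def FM (g : List (List Char)) (i : Nat) (cp cc pm : List Int) : Nat → Int
  | 0 => bSmCol0 g i pm
  | j + 1 =>
      (pm.getD (j + 1) 0 + (if isYY g i (j + 1) (i - 1) (j + 1) then cp.getD (j + 1) 0 else 0) +
        FM g i cp cc pm j + (if isYY g i (j + 1) i j then cc.getD j 0 else 0)) % pMOD

def CRf (W : Nat) : Nat → List Int
  | 0 => List.replicate W 1
  | i + 1 => bCntRow W (CRf W i)

theorem bCntRow_eq (W : Nat) (pc : List Int) (hW : 1 ≤ W) :
    bCntRow W pc = (List.range W).map (FC pc) := by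
  have h := foldl_build (fun st j => let c := (pc.getD j 0 + st.2) % pMOD; (st.1 ++ [c], c))
      (fun j p => (pc.getD j 0 + p) % pMOD) (FC pc) (fun st j => rfl) (fun j => rfl) (W - 1) [1]
  unfold bCntRow
  rw [show ([(1 : Int)], (1 : Int)) = (([(1 : Int)], FC pc 0) : List Int × Int) from rfl, h]
  show [FC pc 0] ++ _ = _
  rw [map_range_build, Nat.sub_add_cancel hW]

theorem bSmRow0_eq (g : List (List Char)) (W : Nat) (hW : 1 ≤ W) :
    bSmRow0 g W = (List.range W).map (FM0 g) := by
  have h := foldl_build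
      (fun st j => let c := (st.2 + (if isYY g 0 j 0 (j - 1) then 1 else 0)) % pMOD; (st.1 ++ [c], c))
      (fun j p => (p + (if isYY g 0 j 0 (j - 1) then 1 else 0)) % pMOD) (FM0 g)
      (fun st j => rfl) (fun j => rfl) (W - 1) [0]
  unfold bSmRow0
  rw [show ([(0 : Int)], (0 : Int)) = (([(0 : Int)], FM0 g 0) : List Int × Int) from rfl, h]
  show [FM0 g 0] ++ _ = _
  rw [map_range_build, Nat.sub_add_cancel hW]

theorem bSmRow_eq (g : List (List Char)) (W i : Nat) (cp cc pm : List Int) (hW : 1 ≤ W) :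
    bSmRow g W i cp cc pm = (List.range W).map (FM g i cp cc pm) := by
  have h := foldl_build
      (fun st j =>
        let c := (pm.getD j 0 + (if isYY g i j (i - 1) j then cp.getD j 0 else 0) +
                  st.2 + (if isYY g i j i (j - 1) then cc.getD (j - 1) 0 else 0)) % pMOD
        (st.1 ++ [c], c))
      (fun j p => (pm.getD j 0 + (if isYY g i j (i - 1) j then cp.getD j 0 else 0) +
        p + (if isYY g i j i (j - 1) then cc.getD (j - 1) 0 else 0)) % pMOD)
      (FM g i cp cc pm) (fun st j => rfl) (fun j => rfl) (W - 1) [bSmCol0 g i pm]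
  unfold bSmRow
  rw [show ([bSmCol0 g i pm], bSmCol0 g i pm)
        = (([bSmCol0 g i pm], FM g i cp cc pm 0) : List Int × Int) from rfl, h]
  show [FM g i cp cc pm 0] ++ _ = _
  rw [map_range_build, Nat.sub_add_cancel hW]

theorem bCntGrid_eq (W H : Nat) :
    bCntGrid W H = (List.range (H - 1 + 1)).map (CRf W) := by
  have h := foldl_build (fun st (_i : Nat) => let r := bCntRow W st.2; (st.1 ++ [r], r))
      (fun _i prev => bCntRow W prev) (CRf W) (fun st j => rfl) (fun j => rfl) (H - 1)
      [List.replicate W 1]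
  unfold bCntGrid
  rw [show ([List.replicate W (1 : Int)], List.replicate W (1 : Int))
        = (([List.replicate W (1 : Int)], CRf W 0) : List (List Int) × List Int) from rfl, h]
  show [CRf W 0] ++ _ = _
  rw [map_range_build]

def MRb (g : List (List Char)) (W H : Nat) : Nat → List Int
  | 0 => bSmRow0 g W
  | i + 1 => bSmRow g W (i + 1) ((bCntGrid W H).getD i []) ((bCntGrid W H).getD (i + 1) [])
      (MRb g W H i)

theorem bSmGrid_eq (g : List (List Char)) (W H : Nat) :
    bSmGrid g W H = (List.range (H - 1 + 1)).map (MRb g W H) := by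
  have h := foldl_build
      (fun st i =>
        let r := bSmRow g W i ((bCntGrid W H).getD (i - 1) []) ((bCntGrid W H).getD i []) st.2
        (st.1 ++ [r], r))
      (fun i prev => bSmRow g W i ((bCntGrid W H).getD (i - 1) []) ((bCntGrid W H).getD i []) prev)
      (MRb g W H) (fun st j => rfl) (fun j => rfl) (H - 1) [bSmRow0 g W]
  unfold bSmGrid
  rw [show ([bSmRow0 g W], bSmRow0 g W)
        = (([bSmRow0 g W], MRb g W H 0) : List (List Int) × List Int) from rfl, h]
  show [MRb g W H 0] ++ _ = _
  rw [map_range_build]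

theorem CRf_inv (W : Nat) (hW : 1 ≤ W) :
    ∀ i j, j < W → (((CRf W i).getD j 0 : Int) : ZMod 998244353) = (Npaths i j : ZMod 998244353) := by
  intro i
  induction i with
  | zero =>
    intro j hj
    simp only [CRf]
    rw [List.getD_replicate (h := hj), Npaths_zero]
  | succ i ih =>
    intro j
    induction j with
    | zero =>
      intro hj
      simp only [CRf]
      rw [bCntRow_eq W _ hW, getD_map_range _ _ _ _ hj, Npaths_zero']
      simp [FC]
    | succ j ihj =>
      intro hj
      have hj' : j < W := Nat.lt_of_succ_lt hj
      have hprev := ihj hj'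
      simp only [CRf] at hprev ⊢
      rw [bCntRow_eq W _ hW, getD_map_range _ _ _ _ hj]
      rw [bCntRow_eq W _ hW, getD_map_range _ _ _ _ hj'] at hprev
      show ((((CRf W i).getD (j + 1) 0 + FC (CRf W i) j) % pMOD : Int) : ZMod 998244353) = _
      rw [Npaths_succ]
      apply Eq.trans (castM _)
      simp only [Int.cast_add, Int.cast_mul, Int.cast_one, Int.cast_zero, Int.cast_two, Int.cast_pow, ih (j + 1) hj, hprev]

theorem cnt_inv (W H : Nat) (hW : 1 ≤ W) (hH : 1 ≤ H) :
    ∀ i, i < H → ∀ j, j < W →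
      ((((bCntGrid W H).getD i []).getD j 0 : Int) : ZMod 998244353) =
        (Npaths i j : ZMod 998244353) := by
  intro i hi j hj
  have hH1 : H - 1 + 1 = H := by omega
  rw [bCntGrid_eq, hH1, getD_map_range _ _ _ _ hi]
  exact CRf_inv W hW i j hj

theorem FM0_inv (g : List (List Char)) :
    ∀ j, ((FM0 g j : Int) : ZMod 998244353) = (Spaths g 0 j : ZMod 998244353) := by
  intro j
  induction j with
  | zero => simp [FM0, Spaths]
  | succ j ih =>
    show (((FM0 g j + (if isYY g 0 (j + 1) 0 j then 1 else 0)) % pMOD : Int) : ZMod 998244353) = _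
    apply Eq.trans (castM _)
    have hS : Spaths g 0 (j + 1) = Spaths g 0 j + (if isYY g 0 (j + 1) 0 j then 1 else 0) := by
      simp [Spaths, wh, Npaths_zero, Nat.add_sub_cancel]
    rw [hS]
    split_ifs <;> simp only [Int.cast_add, Int.cast_mul, Int.cast_one, Int.cast_zero, Int.cast_two, Int.cast_pow, ih]

theorem FM_inv (g : List (List Char)) (W i : Nat) (hW : 1 ≤ W) (cp cc pm : List Int)
    (hcp : ∀ j, j < W → ((cp.getD j 0 : Int) : ZMod 998244353) = (Npaths i j : ZMod 998244353))
    (hcc : ∀ j, j < W → ((cc.getD j 0 : Int) : ZMod 998244353) = (Npaths (i + 1) j : ZMod 998244353))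
    (hpm : ∀ j, j < W → ((pm.getD j 0 : Int) : ZMod 998244353) = (Spaths g i j : ZMod 998244353)) :
    ∀ j, j < W →
      ((FM g (i + 1) cp cc pm j : Int) : ZMod 998244353) = (Spaths g (i + 1) j : ZMod 998244353) := by
  intro j
  induction j with
  | zero =>
    intro h0
    show ((bSmCol0 g (i + 1) pm : Int) : ZMod 998244353) = _
    unfold bSmCol0
    apply Eq.trans (castM _)
    have hS : Spaths g (i + 1) 0 = Spaths g i 0 + wv g (i + 1) 0 * Npaths i 0 := by
      simp [Spaths]
    have hwx : wv g (i + 1) 0 = if isYY g (i + 1) 0 i 0 then 1 else 0 := by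
      simp [wv, Nat.add_sub_cancel]
    rw [hS, hwx, Npaths_zero']
    simp only [Nat.add_sub_cancel]
    split_ifs <;> (simp only [Int.cast_add, Int.cast_mul, Int.cast_one, Int.cast_zero, Int.cast_two, Int.cast_pow, hpm 0 h0]; try ring)
  | succ j ihj =>
    intro hj
    have hj' : j < W := Nat.lt_of_succ_lt hj
    show ((((pm.getD (j + 1) 0 +
        (if isYY g (i + 1) (j + 1) (i + 1 - 1) (j + 1) then cp.getD (j + 1) 0 else 0) +
        FM g (i + 1) cp cc pm j +
        (if isYY g (i + 1) (j + 1) (i + 1) j then cc.getD j 0 else 0)) % pMOD : Int)) : ZMod 998244353) = _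
    apply Eq.trans (castM _)
    have hS : Spaths g (i + 1) (j + 1) = Spaths g i (j + 1) +
        wv g (i + 1) (j + 1) * Npaths i (j + 1) +
        (Spaths g (i + 1) j + wh g (i + 1) (j + 1) * Npaths (i + 1) j) := by
      simp [Spaths]
    have hwv : wv g (i + 1) (j + 1) = if isYY g (i + 1) (j + 1) i (j + 1) then 1 else 0 := by
      simp [wv, Nat.add_sub_cancel]
    have hwh : wh g (i + 1) (j + 1) = if isYY g (i + 1) (j + 1) (i + 1) j then 1 else 0 := by
      simp [wh, Nat.add_sub_cancel]
    rw [hS, hwv, hwh]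
    simp only [Nat.add_sub_cancel]
    split_ifs <;>
      (simp only [Int.cast_add, Int.cast_mul, Int.cast_one, Int.cast_zero, Int.cast_two, Int.cast_pow, hpm (j + 1) hj, ihj hj', hcp (j + 1) hj, hcc j hj']; try ring)

theorem sm_inv (g : List (List Char)) (W H : Nat) (hW : 1 ≤ W) (hH : 1 ≤ H) :
    ∀ i, i < H → ∀ j, j < W →
      ((((bSmGrid g W H).getD i []).getD j 0 : Int) : ZMod 998244353) =
        (Spaths g i j : ZMod 998244353) := by
  have hH1 : H - 1 + 1 = H := by omega
  intro i
  induction i with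
  | zero =>
    intro _ j hj
    rw [bSmGrid_eq, hH1, getD_map_range _ _ _ _ (by omega : 0 < H)]
    show (((bSmRow0 g W).getD j 0 : Int) : ZMod 998244353) = _
    rw [bSmRow0_eq g W hW, getD_map_range _ _ _ _ hj]
    exact FM0_inv g j
  | succ i ih =>
    intro hi j hj
    have hi' : i < H := Nat.lt_of_succ_lt hi
    rw [bSmGrid_eq, hH1, getD_map_range _ _ _ _ hi]
    show (((MRb g W H (i + 1)).getD j 0 : Int) : ZMod 998244353) = _
    rw [MRb, bSmRow_eq g W (i + 1) _ _ _ hW, getD_map_range _ _ _ _ hj]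
    refine FM_inv g W i hW _ _ _ ?_ ?_ ?_ j hj
    · intro k hk; exact cnt_inv W H hW hH i hi' k hk
    · intro k hk; exact cnt_inv W H hW hH (i + 1) hi k hk
    · intro k hk
      have := ih hi' k hk
      rwa [bSmGrid_eq, hH1, getD_map_range _ _ _ _ hi'] at this

-- ===== B-side accumulation =====
def bTerm (g : List (List Char)) (cnt sm : List (List Int)) (H W i j : Nat) : Int :=
  (if 0 < i ∧ isYY g i j (i - 1) j = true then
      (2 * ((sm.getD (i - 1) []).getD j 0) + (cnt.getD (i - 1) []).getD j 0) *
        ((cnt.getD (H - 1 - i) []).getD (W - 1 - j) 0)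
    else 0) +
  (if 0 < j ∧ isYY g i j i (j - 1) = true then
      (2 * ((sm.getD i []).getD (j - 1) 0) + (cnt.getD i []).getD (j - 1) 0) *
        ((cnt.getD (H - 1 - i) []).getD (W - 1 - j) 0)
    else 0)

theorem foldl_add_eq (t : Nat → Int) : ∀ (l : List Nat) (a : Int),
    l.foldl (fun acc x => acc + t x) a = a + (l.map t).sum := by
  intro l
  induction l with
  | nil => intro a; simp
  | cons x xs ih => intro a; simp [ih, add_assoc]

theorem map_range_sum (f : Nat → Int) : ∀ n,
    ((List.range n).map f).sum = ∑ i ∈ Finset.range n, f i := by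
  intro n
  induction n with
  | zero => simp
  | succ n ih =>
    rw [List.range_succ, Finset.sum_range_succ, List.map_append, List.sum_append, ih]
    simp

theorem bAcc_eq (g : List (List Char)) (cnt sm : List (List Int)) (H W : Nat) :
    ((List.range H).foldl
      (fun acc i => (List.range W).foldl
        (fun acc j =>
          let rest := (cnt.getD (H - 1 - i) []).getD (W - 1 - j) 0
          let acc1 := if 0 < i ∧ isYY g i j (i - 1) j = true then
              acc + (2 * ((sm.getD (i - 1) []).getD j 0) + (cnt.getD (i - 1) []).getD j 0) * rest
            else acc
          if 0 < j ∧ isYY g i j i (j - 1) = true then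
            acc1 + (2 * ((sm.getD i []).getD (j - 1) 0) + (cnt.getD i []).getD (j - 1) 0) * rest
          else acc1)
        acc)
      0) = ∑ i ∈ Finset.range H, ∑ j ∈ Finset.range W, bTerm g cnt sm H W i j := by
  have hinner : ∀ i : Nat,
      (fun (acc : Int) (j : Nat) =>
          let rest := (cnt.getD (H - 1 - i) []).getD (W - 1 - j) 0
          let acc1 := if 0 < i ∧ isYY g i j (i - 1) j = true then
              acc + (2 * ((sm.getD (i - 1) []).getD j 0) + (cnt.getD (i - 1) []).getD j 0) * rest
            else acc
          if 0 < j ∧ isYY g i j i (j - 1) = true then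
            acc1 + (2 * ((sm.getD i []).getD (j - 1) 0) + (cnt.getD i []).getD (j - 1) 0) * rest
          else acc1) =
      fun acc j => acc + bTerm g cnt sm H W i j := by
    intro i
    funext acc j
    simp only [bTerm]
    split_ifs <;> ring
  have houter :
      (fun (acc : Int) (i : Nat) => (List.range W).foldl
        (fun acc j =>
          let rest := (cnt.getD (H - 1 - i) []).getD (W - 1 - j) 0
          let acc1 := if 0 < i ∧ isYY g i j (i - 1) j = true then
              acc + (2 * ((sm.getD (i - 1) []).getD j 0) + (cnt.getD (i - 1) []).getD j 0) * rest
            else acc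
          if 0 < j ∧ isYY g i j i (j - 1) = true then
            acc1 + (2 * ((sm.getD i []).getD (j - 1) 0) + (cnt.getD i []).getD (j - 1) 0) * rest
          else acc1)
        acc) =
      fun acc i => acc + ∑ j ∈ Finset.range W, bTerm g cnt sm H W i j := by
    funext acc i
    rw [hinner i, foldl_add_eq, map_range_sum]
  rw [houter, foldl_add_eq, map_range_sum]
  simp

theorem bTerm_modeq (g : List (List Char)) (H W : Nat) (hW : 1 ≤ W) (hH : 1 ≤ H) :
    ∀ i, i < H → ∀ j, j < W →
      ((bTerm g (bCntGrid W H) (bSmGrid g W H) H W i j : Int) : ZMod 998244353) =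
        ((gQ g i j * Npaths (H - 1 - i) (W - 1 - j) : Int) : ZMod 998244353) := by
  intro i hi j hj
  have hrest : ((((bCntGrid W H).getD (H - 1 - i) []).getD (W - 1 - j) 0 : Int) : ZMod 998244353) =
      (Npaths (H - 1 - i) (W - 1 - j) : ZMod 998244353) :=
    cnt_inv W H hW hH _ (by omega) _ (by omega)
  obtain _ | i := i <;> obtain _ | j := j
  · simp only [bTerm, lt_self_iff_false, false_and, if_false, gQ]
    simp
  · have hj' : j < W := Nat.lt_of_succ_lt hj
    have c1 := sm_inv g W H hW hH 0 (by omega) j hj'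
    have c2 := cnt_inv W H hW hH 0 (by omega) j hj'
    simp only [bTerm, lt_self_iff_false, false_and, if_false, Nat.zero_lt_succ, true_and,
      Nat.add_sub_cancel, gQ]
    have hwh : wh g 0 (j + 1) = if isYY g 0 (j + 1) 0 j then 1 else 0 := by
      simp [wh, Nat.add_sub_cancel]
    rw [hwh]
    split_ifs <;> (simp only [Int.cast_add, Int.cast_mul, Int.cast_one, Int.cast_zero, Int.cast_two, Int.cast_pow, c1, c2, hrest]; try ring)
  · have hi' : i < H := Nat.lt_of_succ_lt hi
    have c1 := sm_inv g W H hW hH i hi' 0 (by omega)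
    have c2 := cnt_inv W H hW hH i hi' 0 (by omega)
    simp only [bTerm, lt_self_iff_false, false_and, if_false, Nat.zero_lt_succ, true_and,
      Nat.add_sub_cancel, gQ]
    have hwv : wv g (i + 1) 0 = if isYY g (i + 1) 0 i 0 then 1 else 0 := by
      simp [wv, Nat.add_sub_cancel]
    rw [hwv]
    split_ifs <;> (simp only [Int.cast_add, Int.cast_mul, Int.cast_one, Int.cast_zero, Int.cast_two, Int.cast_pow, c1, c2, hrest]; try ring)
  · have hi' : i < H := Nat.lt_of_succ_lt hi
    have hj' : j < W := Nat.lt_of_succ_lt hj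
    have c1 := sm_inv g W H hW hH i hi' (j + 1) hj
    have c2 := cnt_inv W H hW hH i hi' (j + 1) hj
    have c3 := sm_inv g W H hW hH (i + 1) hi j hj'
    have c4 := cnt_inv W H hW hH (i + 1) hi j hj'
    simp only [bTerm, Nat.zero_lt_succ, true_and, Nat.add_sub_cancel, gQ]
    have hwv : wv g (i + 1) (j + 1) = if isYY g (i + 1) (j + 1) i (j + 1) then 1 else 0 := by
      simp [wv, Nat.add_sub_cancel]
    have hwh : wh g (i + 1) (j + 1) = if isYY g (i + 1) (j + 1) (i + 1) j then 1 else 0 := by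
      simp [wh, Nat.add_sub_cancel]
    rw [hwv, hwh]
    split_ifs <;> (simp only [Int.cast_add, Int.cast_mul, Int.cast_one, Int.cast_zero, Int.cast_two, Int.cast_pow, c1, c2, c3, c4, hrest]; try ring)

-- ===== VERDICT (by name: the statement is the Claim_ definition above) =====
theorem solve_spec : Claim_equal_solve := by
  intro h_ w s_list _hdom hpre
  obtain ⟨hh, hw, -⟩ := hpre
  unfold Spec_solve solve solve_alt
  simp only []
  set H := h_.toNat with hHd
  set W := w.toNat with hWd
  have hH1 : 1 ≤ H := by omega
  have hW1 : 1 ≤ W := by omega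
  set g := s_list.map (·.toList) with hgd
  have hA : (List.range' 1 (H - 1)).foldl (fun prev i => aRow g W i prev) (aRow0 g W)
      = ARf g W (H - 1) :=
    foldl_iter _ (fun i prev => aRow g W i prev) (ARf g W) (fun p j => rfl) (fun j => rfl) (H - 1)
  rw [hA]
  obtain ⟨F, hF⟩ := ARf_map g W hW1 (H - 1)
  have hinv := ARf_inv g W hW1 (H - 1) (W - 1) (by omega)
  rw [hF, getD_map_range _ _ _ _ (by omega : W - 1 < W)] at hinv
  rw [hF, getLastD_map_range _ _ _ hW1, hinv.1]
  rw [bAcc_eq g (bCntGrid W H) (bSmGrid g W H) H W]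
  apply mod_eq_of_cast
  have hH2 : H - 1 + 1 = H := by omega
  have hW2 : W - 1 + 1 = W := by omega
  rw [QgN g (H - 1) (W - 1), hH2, hW2]
  rw [Int.cast_sum, Int.cast_sum]
  refine Finset.sum_congr rfl fun i hi => ?_
  rw [Int.cast_sum, Int.cast_sum]
  refine Finset.sum_congr rfl fun j hj => ?_
  rw [Finset.mem_range] at hi hj
  exact (bTerm_modeq g H W hW1 hH1 i hi j hj).symm
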